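-- pv_equiv track=rewrite | github.com/sam-ple/minescript-scripts | autoloot.py | _mat_of
-- ===== SOURCE A (Python) =====
-- def _mat_of(item_id: str) -> str | None:
--     if not item_id: return None
--     it = item_id.split(":")[-1]
--     it = it.replace("golden_", "gold_").replace("wooden_", "wood_")
--     if it == "turtle_helmet": return "turtle"
--     for mname in ["netherite","diamond","iron","chainmail","gold","leather","stone","wood"]:
--         if it.startswith(mname + "_"): return mname
--     return None
-- ===== SOURCE B (Python) =====
-- def _trie_insert(node, word, name):
--     if not word:
--         node[None] = name
--     else:
--         child = node.get(word[0])
--         if child is None: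
--             child = {}
--             node[word[0]] = child
--         _trie_insert(child, word[1:], name)
--
--
-- def _build_trie(names):
--     root = {}
--     for m in names:
--         _trie_insert(root, m + "_", m)
--     return root
--
--
-- _TRIE = _build_trie(["netherite", "diamond", "iron", "chainmail",
--                      "gold", "leather", "stone", "wood"])
--
--
-- def _mat_of(item_id: str) -> str | None:
--     it = item_id.split(":")[-1]
--     it = it.replace("golden_", "gold_").replace("wooden_", "wood_")
--     if it == "turtle_helmet":
--         return "turtle"
--     node = _TRIE
--     for ch in it:
--         node = node.get(ch)
--         if node is None:
--             return None
--         if None in node: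
--             return node[None]
--     return None
-- ===== Notes on version B (the rewrite author's own statement) =====
-- stated objective: alternative
-- what changed: The scan over eight underscore-suffixed startswith candidates is replaced by a character trie built once from the material names and walked a single time over the token, pruning candidates per character.
import Mathlib
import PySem

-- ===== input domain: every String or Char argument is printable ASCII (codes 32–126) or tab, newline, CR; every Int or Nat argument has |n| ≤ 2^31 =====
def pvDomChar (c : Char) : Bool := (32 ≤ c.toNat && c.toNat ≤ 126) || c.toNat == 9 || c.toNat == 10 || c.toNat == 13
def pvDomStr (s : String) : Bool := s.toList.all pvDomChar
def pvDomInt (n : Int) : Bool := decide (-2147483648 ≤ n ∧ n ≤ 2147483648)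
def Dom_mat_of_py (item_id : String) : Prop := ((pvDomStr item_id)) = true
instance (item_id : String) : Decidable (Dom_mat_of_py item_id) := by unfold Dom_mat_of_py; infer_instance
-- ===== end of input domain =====

-- B replaces A's scan of eight `startswith(mname + "_")` candidates by a character trie built
-- once from the material names and walked a single time over the token (objective: alternative).

-- ===== PORT A =====
-- the for-loop over the candidate list, with early return on the first startswith hit
def matLoopA (it : String) : List String → Option String
  | [] => none
  | m :: rest => if PySem.Str.startswith it (m ++ "_") then some m else matLoopA it rest

def mat_of_py (item_id : String) : Option String :=
  if item_id = "" then none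
  else
    let it := PySem.List.pyGetD ((PySem.Str.split? item_id ":").getD []) (-1) ""
    let it := PySem.Str.replace (PySem.Str.replace it "golden_" "gold_") "wooden_" "wood_"
    if it = "turtle_helmet" then some "turtle"
    else matLoopA it ["netherite", "diamond", "iron", "chainmail", "gold", "leather", "stone", "wood"]

-- ===== PORT B =====
-- a trie over characters: each node carries its accept marker (the dict key None of Source B)
-- and its children in insertion order (the nested dicts of Source B)
mutual
inductive Trie where
  | node : Option String → TrieKids → Trie
inductive TrieKids where
  | nil : TrieKids
  | cons : Char → Trie → TrieKids → TrieKids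
end

-- dict get on a node's children
def kidsGet : TrieKids → Char → Option Trie
  | .nil, _ => none
  | .cons c t k, d => if c = d then some t else kidsGet k d

-- dict overwrite-in-place on a node's children
def kidsSet : TrieKids → Char → Trie → TrieKids
  | .nil, c, t => .cons c t .nil
  | .cons c t k, d, u => if c = d then .cons c u k else .cons c t (kidsSet k d u)

def emptyTrie : Trie := .node none .nil

-- _trie_insert of Source B (recursion on the word)
def trieInsert : Trie → List Char → String → Trie
  | .node _ k, [], n => .node (some n) k
  | .node m k, c :: w, n => .node m (kidsSet k c (trieInsert ((kidsGet k c).getD emptyTrie) w n))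

-- _build_trie of Source B
def buildTrie (names : List String) : Trie :=
  names.foldl (fun t m => trieInsert t (m ++ "_").toList m) emptyTrie

def theTrie : Trie :=
  buildTrie ["netherite", "diamond", "iron", "chainmail", "gold", "leather", "stone", "wood"]

def markOf : Trie → Option String
  | .node m _ => m

def childOf : Trie → Char → Option Trie
  | .node _ k, c => kidsGet k c

-- the for-ch loop of Source B: descend one edge per character, stop at the first marked node
def walkTrie : Trie → List Char → Option String
  | _, [] => none
  | t, c :: rest =>
      match childOf t c with
      | none => none
      | some t' =>
          match markOf t' with
          | some n => some n
          | none => walkTrie t' rest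

def mat_of_py_alt (item_id : String) : Option String :=
  let it := PySem.List.pyGetD ((PySem.Str.split? item_id ":").getD []) (-1) ""
  let it := PySem.Str.replace (PySem.Str.replace it "golden_" "gold_") "wooden_" "wood_"
  if it = "turtle_helmet" then some "turtle"
  else walkTrie theTrie it.toList

-- ===== PRECONDITION & SPEC =====
def Spec_mat_of_py (item_id : String) (out : Option String) : Prop := out = mat_of_py_alt item_id
instance (item_id : String) (out : Option String) : Decidable (Spec_mat_of_py item_id out) := by
  unfold Spec_mat_of_py; infer_instance

-- ===== CLAIM (what is proved, stated in full; the proofs are below) =====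
def Claim_equal_mat_of_py : Prop :=
  ∀ (item_id : String), Dom_mat_of_py item_id → Spec_mat_of_py item_id (mat_of_py item_id)

-- ===== LEMMAS AND PROOFS =====

-- (pattern, name) pairs, the trie built from them, and the first-match list-scan semantics
def buildFrom (t : Trie) (ps : List (List Char × String)) : Trie :=
  ps.foldl (fun t q => trieInsert t q.1 q.2) t

def scanPairs (ps : List (List Char × String)) (cs : List Char) : Option String :=
  (ps.find? (fun q => q.1.isPrefixOf cs)).map Prod.snd

def descendPairs (ps : List (List Char × String)) (c : Char) : List (List Char × String) :=
  ps.filterMap (fun q => match q.1 with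
    | [] => none
    | d :: w => if d = c then some (w, q.2) else none)

-- prefix-freeness: no pattern is a prefix of another (so at most one pattern ever matches)
def PFree (ps : List (List Char × String)) : Prop :=
  ps.Pairwise (fun p q => ¬ (p.1 <+: q.1) ∧ ¬ (q.1 <+: p.1))

def thePairs : List (List Char × String) :=
  ["netherite", "diamond", "iron", "chainmail", "gold", "leather", "stone", "wood"].map
    (fun m => ((m ++ "_").toList, m))

def mfold (qs : List (List Char × String)) (acc : Option String) : Option String :=
  qs.foldl (fun m q => if q.1 = [] then some q.2 else m) acc

lemma mfold_cons (q : List Char × String) (qs : List (List Char × String)) (acc : Option String) :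
    mfold (q :: qs) acc = mfold qs (if q.1 = [] then some q.2 else acc) := rfl

lemma kidsGet_kidsSet : ∀ (k : TrieKids) (d c : Char) (u : Trie),
    kidsGet (kidsSet k d u) c = if d = c then some u else kidsGet k c
  | .nil, d, c, u => by by_cases h : d = c <;> simp [kidsSet, kidsGet, h]
  | .cons c0 t0 k0, d, c, u => by
      have ih := kidsGet_kidsSet k0 d c u
      by_cases h0 : c0 = d
      · subst h0
        by_cases h : c0 = c <;> simp [kidsSet, kidsGet, h]
      · by_cases h : c0 = c
        · subst h
          simp [kidsSet, kidsGet, h0, Ne.symm h0]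
        · simp [kidsSet, kidsGet, h0, h, ih]

lemma markOf_insert (t : Trie) (w : List Char) (n : String) :
    markOf (trieInsert t w n) = if w = [] then some n else markOf t := by
  cases t with
  | node m k => cases w <;> simp [trieInsert, markOf]

lemma childOf_insert_nil (t : Trie) (n : String) (c : Char) :
    childOf (trieInsert t [] n) c = childOf t c := by
  cases t with
  | node m k => simp [trieInsert, childOf]

lemma childOf_insert_cons (t : Trie) (d : Char) (w : List Char) (n : String) (c : Char) :
    childOf (trieInsert t (d :: w) n) c =
      if d = c then some (trieInsert ((childOf t c).getD emptyTrie) w n) else childOf t c := by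
  cases t with
  | node m k =>
      by_cases hd : d = c
      · subst hd; simp [trieInsert, childOf, kidsGet_kidsSet]
      · simp [trieInsert, childOf, kidsGet_kidsSet, hd]

-- descending one edge of the trie built from ps
def ocb : Option Trie → List (List Char × String) → Option Trie
  | none, [] => none
  | o, qs => some (buildFrom (o.getD emptyTrie) qs)

lemma ocb_nil (o : Option Trie) : ocb o [] = o := by cases o <;> rfl

lemma ocb_some (t : Trie) (qs : List (List Char × String)) :
    ocb (some t) qs = some (buildFrom t qs) := by cases qs <;> rfl

lemma ocb_cons (o : Option Trie) (q : List Char × String) (qs : List (List Char × String)) :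
    ocb o (q :: qs) = some (buildFrom (o.getD emptyTrie) (q :: qs)) := by cases o <;> rfl

lemma descend_nil_pat (n : String) (ps : List (List Char × String)) (c : Char) :
    descendPairs (([], n) :: ps) c = descendPairs ps c := by
  simp [descendPairs]

lemma descend_cons_pat (d : Char) (w : List Char) (n : String)
    (ps : List (List Char × String)) (c : Char) :
    descendPairs ((d :: w, n) :: ps) c =
      if d = c then (w, n) :: descendPairs ps c else descendPairs ps c := by
  by_cases hd : d = c
  · subst hd; simp [descendPairs]
  · simp [descendPairs, hd]

lemma childOf_buildFrom (ps : List (List Char × String)) (t : Trie) (c : Char) :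
    childOf (buildFrom t ps) c = ocb (childOf t c) (descendPairs ps c) := by
  induction ps generalizing t with
  | nil => exact (ocb_nil _).symm
  | cons q ps ih =>
      obtain ⟨p, n⟩ := q
      show childOf (buildFrom (trieInsert t p n) ps) c = ocb (childOf t c) (descendPairs ((p, n) :: ps) c)
      rw [ih]
      cases p with
      | nil => rw [descend_nil_pat, childOf_insert_nil]
      | cons d w =>
          rw [descend_cons_pat, childOf_insert_cons]
          by_cases hd : d = c
          · rw [if_pos hd, if_pos hd, ocb_some, ocb_cons]
            rfl
          · rw [if_neg hd, if_neg hd]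

lemma markOf_buildFrom (ps : List (List Char × String)) (t : Trie) :
    markOf (buildFrom t ps) = mfold ps (markOf t) := by
  induction ps generalizing t with
  | nil => rfl
  | cons q ps ih =>
      show markOf (buildFrom (trieInsert t q.1 q.2) ps) = mfold ps (if q.1 = [] then some q.2 else markOf t)
      rw [ih, markOf_insert]

lemma mfold_none_forall : ∀ (qs : List (List Char × String)) (acc : Option String),
    mfold qs acc = none → acc = none ∧ ∀ q ∈ qs, q.1 ≠ [] := by
  intro qs
  induction qs with
  | nil => intro acc h; exact ⟨h, by simp⟩
  | cons q qs ih =>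
      intro acc h
      rw [mfold_cons] at h
      obtain ⟨h1, h2⟩ := ih _ h
      by_cases hq : q.1 = []
      · rw [if_pos hq] at h1; exact absurd h1 (by simp)
      · rw [if_neg hq] at h1
        refine ⟨h1, ?_⟩
        intro r hr
        rcases List.mem_cons.mp hr with rfl | hr'
        · exact hq
        · exact h2 r hr'

-- a marked node forces a singleton residual pattern set (prefix-freeness)
lemma mark_singleton : ∀ (qs : List (List Char × String)), PFree qs → ∀ (n : String),
    mfold qs none = some n → qs = [([], n)] := by
  intro qs
  induction qs with
  | nil => intro _ n h; exact absurd h (by simp [mfold])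
  | cons q qs ih =>
      intro hf n h
      rw [mfold_cons] at h
      by_cases hq : q.1 = []
      · rw [if_pos hq] at h
        have hqs : qs = [] := by
          cases qs with
          | nil => rfl
          | cons r rs =>
              have hr := (List.pairwise_cons.mp hf).1 r List.mem_cons_self
              exact absurd (by rw [hq]; exact List.nil_prefix) hr.1
        subst hqs
        have h2 : q.2 = n := by simpa [mfold] using h
        obtain ⟨p, m⟩ := q
        simp only at hq h2
        rw [hq, h2]
      · rw [if_neg hq] at h
        have hqs := ih (List.pairwise_cons.mp hf).2 n h
        have hr := (List.pairwise_cons.mp hf).1 ([], n) (by rw [hqs]; exact List.mem_cons_self)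
        exact absurd List.nil_prefix hr.2

lemma mem_descend {ps : List (List Char × String)} {c : Char} {r : List Char × String}
    (h : r ∈ descendPairs ps c) : (c :: r.1, r.2) ∈ ps := by
  obtain ⟨r1, r2⟩ := r
  simp only [descendPairs, List.mem_filterMap] at h
  obtain ⟨a, ha, hfa⟩ := h
  obtain ⟨p, n⟩ := a
  cases p with
  | nil => simp at hfa
  | cons d w =>
      dsimp only at hfa
      by_cases hd : d = c
      · rw [if_pos hd] at hfa
        rw [Option.some.injEq, Prod.mk.injEq] at hfa
        obtain ⟨rfl, rfl⟩ := hfa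
        subst hd
        exact ha
      · simp [hd] at hfa

lemma descend_pfree : ∀ (ps : List (List Char × String)) (c : Char), PFree ps → PFree (descendPairs ps c) := by
  intro ps c
  induction ps with
  | nil => intro _; exact List.Pairwise.nil
  | cons q ps ih =>
      intro hf
      obtain ⟨p, n⟩ := q
      have hh := (List.pairwise_cons.mp hf).1
      have hf' := (List.pairwise_cons.mp hf).2
      cases p with
      | nil => rw [descend_nil_pat]; exact ih hf'
      | cons d w =>
          rw [descend_cons_pat]
          by_cases hd : d = c
          · rw [if_pos hd]
            subst hd
            refine List.Pairwise.cons ?_ (ih hf')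
            intro r hr
            have hm := hh _ (mem_descend hr)
            constructor
            · intro hpre; exact hm.1 (List.cons_prefix_cons.mpr ⟨rfl, hpre⟩)
            · intro hpre; exact hm.2 (List.cons_prefix_cons.mpr ⟨rfl, hpre⟩)
          · rw [if_neg hd]; exact ih hf'

lemma scan_descend (c : Char) (rest : List Char) : ∀ (ps : List (List Char × String)),
    (∀ q ∈ ps, q.1 ≠ []) → scanPairs ps (c :: rest) = scanPairs (descendPairs ps c) rest := by
  intro ps
  induction ps with
  | nil => intro _; rfl
  | cons q ps ih =>
      intro h1
      obtain ⟨p, n⟩ := q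
      have hp : p ≠ [] := h1 (p, n) List.mem_cons_self
      have ih' := ih (fun r hr => h1 r (List.mem_cons_of_mem _ hr))
      cases p with
      | nil => exact absurd rfl hp
      | cons d w =>
          rw [descend_cons_pat]
          by_cases hd : d = c
          · subst hd
            rw [if_pos rfl]
            cases hw : List.isPrefixOf w rest with
            | true =>
                simp [scanPairs, List.isPrefixOf, hw]
            | false =>
                simp only [scanPairs, List.find?_cons, List.isPrefixOf, hw, beq_self_eq_true,
                  Bool.true_and]
                exact ih'
          · rw [if_neg hd]
            simp only [scanPairs, List.find?_cons, List.isPrefixOf]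
            have hco : (d == c) = false := by simp [hd]
            simp only [hco, Bool.false_and]
            exact ih'

lemma walk_buildFrom (cs : List Char) : ∀ (ps : List (List Char × String)),
    (∀ q ∈ ps, q.1 ≠ []) → PFree ps →
    walkTrie (buildFrom emptyTrie ps) cs = scanPairs ps cs := by
  induction cs with
  | nil =>
      intro ps h1 _
      have hnone : List.find? (fun q => q.1.isPrefixOf ([] : List Char)) ps = none := by
        rw [List.find?_eq_none]
        intro q hq
        obtain ⟨p, n⟩ := q
        cases p with
        | nil => exact fun _ => h1 _ hq rfl
        | cons d w => simp [List.isPrefixOf]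
      simp [walkTrie, scanPairs, hnone]
  | cons c rest ih =>
      intro ps h1 hf
      have hchild : childOf (buildFrom emptyTrie ps) c = ocb none (descendPairs ps c) :=
        childOf_buildFrom ps emptyTrie c
      rcases hqs : descendPairs ps c with _ | ⟨q0, qs'⟩
      · rw [hqs] at hchild
        have hc : childOf (buildFrom emptyTrie ps) c = none := hchild.trans rfl
        simp only [walkTrie, hc]
        rw [scan_descend c rest ps h1, hqs]
        rfl
      · rw [hqs] at hchild
        have hc : childOf (buildFrom emptyTrie ps) c = some (buildFrom emptyTrie (q0 :: qs')) :=
          hchild.trans (by rw [ocb_cons]; rfl)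
        have hmk : markOf (buildFrom emptyTrie (q0 :: qs')) = mfold (q0 :: qs') none :=
          markOf_buildFrom _ _
        simp only [walkTrie, hc, hmk]
        rcases hm : mfold (q0 :: qs') none with _ | n
        · obtain ⟨-, h1'⟩ := mfold_none_forall _ _ hm
          have hf' : PFree (q0 :: qs') := hqs ▸ descend_pfree ps c hf
          rw [ih _ h1' hf', scan_descend c rest ps h1, hqs]
        · have hs := mark_singleton _ (hqs ▸ descend_pfree ps c hf) n hm
          rw [scan_descend c rest ps h1, hqs, hs]
          simp [scanPairs, List.isPrefixOf]

lemma matLoopA_eq_scan (it : String) : ∀ (ms : List String),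
    matLoopA it ms = scanPairs (ms.map (fun m => ((m ++ "_").toList, m))) it.toList := by
  intro ms
  induction ms with
  | nil => rfl
  | cons m ms ih =>
      have hsw : PySem.Str.startswith it (m ++ "_") = (m ++ "_").toList.isPrefixOf it.toList := by
        rw [Bool.eq_iff_iff, PySem.Str.startswith_eq, PySem.Chars.startswith_iff,
          List.isPrefixOf_iff_prefix]
      rw [show matLoopA it (m :: ms)
            = if PySem.Str.startswith it (m ++ "_") then some m else matLoopA it ms from rfl,
        hsw, List.map_cons]
      cases hb : List.isPrefixOf (m ++ "_").toList it.toList with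
      | true =>
          rw [if_pos rfl]
          simp only [scanPairs]
          rw [List.find?_cons]
          simp only [hb]
          rfl
      | false =>
          rw [if_neg (by simp)]
          have hdrop : List.find? (fun q => q.1.isPrefixOf it.toList)
                (((m ++ "_").toList, m) :: List.map (fun m => ((m ++ "_").toList, m)) ms)
              = List.find? (fun q => q.1.isPrefixOf it.toList)
                (List.map (fun m => ((m ++ "_").toList, m)) ms) := by
            rw [List.find?_cons]
            simp only [hb]
          simp only [scanPairs] at ih ⊢
          rw [hdrop]
          exact ih

lemma buildFrom_thePairs : buildFrom emptyTrie thePairs = theTrie := by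
  simp [theTrie, buildTrie, buildFrom, thePairs]

def pfreeB : List (List Char × String) → Bool
  | [] => true
  | q :: qs => (qs.all (fun r => !(q.1.isPrefixOf r.1) && !(r.1.isPrefixOf q.1))) && pfreeB qs

lemma pfreeB_sound : ∀ (ps : List (List Char × String)), pfreeB ps = true → PFree ps := by
  intro ps
  induction ps with
  | nil => intro _; exact List.Pairwise.nil
  | cons q qs ih =>
      intro h
      simp only [pfreeB, Bool.and_eq_true, List.all_eq_true] at h
      refine List.Pairwise.cons ?_ (ih h.2)
      intro r hr
      have hb := h.1 r hr
      simp only [Bool.not_eq_true'] at hb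
      constructor
      · intro hp
        rw [← List.isPrefixOf_iff_prefix] at hp
        rw [hb.1] at hp
        exact absurd hp (by simp)
      · intro hp
        rw [← List.isPrefixOf_iff_prefix] at hp
        rw [hb.2] at hp
        exact absurd hp (by simp)

lemma pfree_thePairs : PFree thePairs := pfreeB_sound _ (by decide)

lemma loop_eq_walk (it : String) :
    matLoopA it ["netherite", "diamond", "iron", "chainmail", "gold", "leather", "stone", "wood"]
      = walkTrie theTrie it.toList := by
  rw [matLoopA_eq_scan, ← buildFrom_thePairs,
    walk_buildFrom it.toList thePairs (by decide) pfree_thePairs]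
  rfl

-- ===== VERDICT (by name: the statement is the Claim_ definition above) =====
theorem mat_of_py_spec : Claim_equal_mat_of_py := by
  intro item_id _
  unfold Spec_mat_of_py mat_of_py mat_of_py_alt
  by_cases h0 : item_id = ""
  · subst h0; decide
  · simp only [if_neg h0]
    split
    · rfl
    · exact loop_eq_walk _
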